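-- pv_equiv track=rewrite | github.com/yaswanthchittepu/Search-Visualizer | parse.py | get_grid_state
-- ===== SOURCE A (Python) =====
-- def get_grid_state(state):
--     M, N = len(state), len(state[0])
--     src = dest = None
--     obs_set = set()
--     for r in range(M):
--         for c in range(N):
--             if(state[r][c] == 1):
--                 obs_set.add((r,c))
--             elif(state[r][c] == 2):
--                 src = (r, c)
--             elif(state[r][c] == 3):
--                 dest = (r, c)
--     return src, dest, obs_set
-- ===== SOURCE B (Python) =====
-- def get_grid_state(state):
--     # Build-then-extract: classify every cell into a value->coordinates table,
--     # then read src/dest/obstacles off the table.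
--     n = len(state[0])
--     cells = [(row[c], (r, c)) for r, row in enumerate(state) for c in range(n)]
--     groups = {}
--     for val, pos in cells:
--         groups[val] = groups.get(val, []) + [pos]
--     src = groups[2][-1] if 2 in groups else None
--     dest = groups[3][-1] if 3 in groups else None
--     return src, dest, set(groups.get(1, []))
-- ===== Notes on version B (the rewrite author's own statement) =====
-- stated objective: alternative
-- what changed: B builds a dict grouping each cell value to its coordinate list in one pass and then extracts src (last coord of value 2), dest (last coord of value 3) and the obstacle set (coords of value 1) from that table, instead of A's per-cell branching into three scalar/set accumulators.
import Mathlib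
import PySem

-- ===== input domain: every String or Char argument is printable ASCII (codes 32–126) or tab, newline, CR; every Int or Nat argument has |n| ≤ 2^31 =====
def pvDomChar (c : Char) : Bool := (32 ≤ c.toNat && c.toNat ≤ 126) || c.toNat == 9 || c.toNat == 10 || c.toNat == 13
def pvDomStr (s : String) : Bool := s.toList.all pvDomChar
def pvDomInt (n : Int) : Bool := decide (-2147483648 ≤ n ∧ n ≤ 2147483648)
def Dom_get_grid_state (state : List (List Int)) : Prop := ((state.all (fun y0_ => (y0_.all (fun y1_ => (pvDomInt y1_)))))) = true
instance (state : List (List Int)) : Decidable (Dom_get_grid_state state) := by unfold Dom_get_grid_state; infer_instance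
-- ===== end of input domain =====

-- B replaces A's per-cell branching into src/dest scalars and a set by one grouping
-- pass (value -> coordinate list) followed by an extraction step: an alternative
-- decomposition of the same O(M*N) scan.


-- ===== PORT A =====
-- state[0] / state[r] / state[r][c] are ported with pyGetD; Python raises there
-- exactly outside Pre_ (empty grid, or a row shorter than row 0).
def get_grid_state (state : List (List Int)) : (Option (Int × Int)) × (Option (Int × Int)) × (List (Int × Int)) :=
  let M : Int := state.length
  let N : Int := (PySem.List.pyGetD state 0 []).length
  (PySem.List.pyRange 0 M 1).foldl (fun acc r =>
    (PySem.List.pyRange 0 N 1).foldl (fun acc c =>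
      let v := PySem.List.pyGetD (PySem.List.pyGetD state r []) c 0
      if v = 1 then (acc.1, acc.2.1, PySem.Set.add acc.2.2 (r, c))
      else if v = 2 then (some (r, c), acc.2.1, acc.2.2)
      else if v = 3 then (acc.1, some (r, c), acc.2.2)
      else acc) acc)
    ((none, none, PySem.Set.empty) : (Option (Int × Int)) × (Option (Int × Int)) × (List (Int × Int)))

-- ===== PORT B =====
-- row[c] ported with pyGetD (Python raises there exactly outside Pre_);
-- groups[v] = groups.get(v, []) + [pos] is Dict.modify v [] (· ++ [pos]);
-- 'groups[2][-1] if 2 in groups else None' is contains / getD / pyGet? l (-1).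
def get_grid_state_alt (state : List (List Int)) : (Option (Int × Int)) × (Option (Int × Int)) × (List (Int × Int)) :=
  let n : Int := (PySem.List.pyGetD state 0 []).length
  let cells : List (Int × (Int × Int)) :=
    (PySem.List.enumerate state).flatMap (fun p =>
      (PySem.List.pyRange 0 n 1).map (fun c => (PySem.List.pyGetD p.2 c 0, (p.1, c))))
  let groups : PySem.Dict Int (List (Int × Int)) :=
    cells.foldl (fun d q => d.modify q.1 [] (· ++ [q.2])) PySem.Dict.empty
  let src : Option (Int × Int) :=
    if groups.contains 2 then PySem.List.pyGet? (groups.getD 2 []) (-1) else none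
  let dest : Option (Int × Int) :=
    if groups.contains 3 then PySem.List.pyGet? (groups.getD 3 []) (-1) else none
  (src, dest, PySem.Set.ofList (groups.getD 1 []))

-- ===== PRECONDITION & SPEC =====
-- Pre_ excludes exactly the inputs where Python A raises IndexError: the empty
-- grid (state[0]) and grids with a row shorter than row 0 (state[r][c]).
def Pre_get_grid_state (state : List (List Int)) : Prop :=
  state ≠ [] ∧ ∀ row ∈ state, state.headI.length ≤ row.length
instance (state : List (List Int)) : Decidable (Pre_get_grid_state state) := by unfold Pre_get_grid_state; infer_instance
def pvWitness_get_grid_state : List (List Int) := [[2, 0], [1, 3]]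
def Spec_get_grid_state (state : List (List Int)) (out : (Option (Int × Int)) × (Option (Int × Int)) × (List (Int × Int))) : Prop := out = get_grid_state_alt state
instance (state : List (List Int)) (out : (Option (Int × Int)) × (Option (Int × Int)) × (List (Int × Int))) : Decidable (Spec_get_grid_state state out) := by unfold Spec_get_grid_state; infer_instance

-- ===== CLAIM (what is proved, stated in full; the proofs are below) =====
def Claim_equal_get_grid_state : Prop := ∀ (state : List (List Int)), Dom_get_grid_state state → Pre_get_grid_state state → Spec_get_grid_state state (get_grid_state state)

-- ===== LEMMAS AND PROOFS =====

-- A's per-cell step, on a (value, position) pair.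
def pvAStep (acc : (Option (Int × Int)) × (Option (Int × Int)) × (List (Int × Int)))
    (q : Int × (Int × Int)) : (Option (Int × Int)) × (Option (Int × Int)) × (List (Int × Int)) :=
  if q.1 = 1 then (acc.1, acc.2.1, PySem.Set.add acc.2.2 q.2)
  else if q.1 = 2 then (some q.2, acc.2.1, acc.2.2)
  else if q.1 = 3 then (acc.1, some q.2, acc.2.2)
  else acc

-- B's per-cell step.
def pvBStep (d : PySem.Dict Int (List (Int × Int))) (q : Int × (Int × Int)) :
    PySem.Dict Int (List (Int × Int)) :=
  d.modify q.1 [] (· ++ [q.2])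

-- Invariant linking B's table to A's accumulator.
def pvRel (d : PySem.Dict Int (List (Int × Int)))
    (acc : (Option (Int × Int)) × (Option (Int × Int)) × (List (Int × Int))) : Prop :=
  acc.1 = (if d.contains 2 then PySem.List.pyGet? (d.getD 2 []) (-1) else none) ∧
  acc.2.1 = (if d.contains 3 then PySem.List.pyGet? (d.getD 3 []) (-1) else none) ∧
  acc.2.2 = PySem.Set.ofList (d.getD 1 [])

theorem pvOfList_snoc (l : List (Int × Int)) (x : Int × Int) :
    PySem.Set.ofList (l ++ [x]) = PySem.Set.add (PySem.Set.ofList l) x := by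
  rw [PySem.Set.ofList_eq_foldl, PySem.Set.ofList_eq_foldl, List.foldl_append]
  rfl

theorem pvRel_step (d : PySem.Dict Int (List (Int × Int)))
    (acc : (Option (Int × Int)) × (Option (Int × Int)) × (List (Int × Int)))
    (q : Int × (Int × Int)) (h : pvRel d acc) : pvRel (pvBStep d q) (pvAStep acc q) := by
  obtain ⟨v, pos⟩ := q
  obtain ⟨h1, h2, h3⟩ := h
  unfold pvRel pvBStep pvAStep
  by_cases hq1 : v = 1
  · subst hq1
    simp only [PySem.Dict.contains_modify,
      PySem.Dict.getD_modify_of_ne d (k := (1 : Int)) (k' := (2 : Int)) [] _ (by decide),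
      PySem.Dict.getD_modify_of_ne d (k := (1 : Int)) (k' := (3 : Int)) [] _ (by decide),
      PySem.Dict.getD_modify_self, pvOfList_snoc]
    norm_num [h1, h2, h3]
  · by_cases hq2 : v = 2
    · subst hq2
      simp only [PySem.Dict.contains_modify,
        PySem.Dict.getD_modify_of_ne d (k := (2 : Int)) (k' := (1 : Int)) [] _ (by decide),
        PySem.Dict.getD_modify_of_ne d (k := (2 : Int)) (k' := (3 : Int)) [] _ (by decide),
        PySem.Dict.getD_modify_self]
      norm_num [h2, h3, PySem.List.pyGet?_neg_one_append_singleton]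
    · by_cases hq3 : v = 3
      · subst hq3
        simp only [PySem.Dict.contains_modify,
          PySem.Dict.getD_modify_of_ne d (k := (3 : Int)) (k' := (1 : Int)) [] _ (by decide),
          PySem.Dict.getD_modify_of_ne d (k := (3 : Int)) (k' := (2 : Int)) [] _ (by decide),
          PySem.Dict.getD_modify_self]
        norm_num [h1, h3, PySem.List.pyGet?_neg_one_append_singleton]
      · simp only [PySem.Dict.contains_modify,
          PySem.Dict.getD_modify_of_ne d (k := v) (k' := (1 : Int)) [] _ (fun h => hq1 h.symm),
          PySem.Dict.getD_modify_of_ne d (k := v) (k' := (2 : Int)) [] _ (fun h => hq2 h.symm),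
          PySem.Dict.getD_modify_of_ne d (k := v) (k' := (3 : Int)) [] _ (fun h => hq3 h.symm)]
        have c1 : ((1 : Int) == v) = false := by simpa using fun h => hq1 h.symm
        have c2 : ((2 : Int) == v) = false := by simpa using fun h => hq2 h.symm
        have c3 : ((3 : Int) == v) = false := by simpa using fun h => hq3 h.symm
        simp [if_neg hq1, if_neg hq2, if_neg hq3, c2, c3, h1, h2, h3]

theorem pvRel_foldl (l : List (Int × (Int × Int)))
    (d : PySem.Dict Int (List (Int × Int)))
    (acc : (Option (Int × Int)) × (Option (Int × Int)) × (List (Int × Int)))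
    (h : pvRel d acc) : pvRel (l.foldl pvBStep d) (l.foldl pvAStep acc) := by
  induction l generalizing d acc with
  | nil => exact h
  | cons q t ih => exact ih _ _ (pvRel_step d acc q h)

theorem pvRel_empty : pvRel PySem.Dict.empty (none, none, PySem.Set.empty) := by
  unfold pvRel
  simp [PySem.Dict.contains_empty, PySem.Dict.getD_empty]

-- ===== VERDICT (by name: the statement is the Claim_ definition above) =====
theorem get_grid_state_spec : Claim_equal_get_grid_state := by
  intro state _ _
  unfold Spec_get_grid_state get_grid_state get_grid_state_alt
  simp only [PySem.List.enumerate_eq_map_pyRange state [], List.flatMap_map,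
    List.foldl_flatMap, List.foldl_map]
  have key := pvRel_foldl
    ((PySem.List.pyRange 0 (PySem.List.len state) 1).flatMap (fun r =>
      (PySem.List.pyRange 0 ((PySem.List.pyGetD state 0 []).length : Int) 1).map
        (fun c => (PySem.List.pyGetD (PySem.List.pyGetD state r []) c 0, (r, c)))))
    PySem.Dict.empty (none, none, PySem.Set.empty) pvRel_empty
  simp only [List.foldl_flatMap, List.foldl_map] at key
  obtain ⟨k1, k2, k3⟩ := key
  -- A's nested fold / B's grouping fold are definitionally the pvAStep / pvBStep folds in `key`
  exact Prod.ext k1 (Prod.ext k2 k3)
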